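-- pv_equiv track=rewrite | github.com/Itachi-1824/Memory-Arc | core/infinite/chunk_formatter.py | _compress_repetitive_content
-- ===== SOURCE A (Python) =====
-- def _compress_repetitive_content(content: str) -> str:
--     """
--     Compress repetitive information while maintaining semantic completeness.
--
--     Args:
--         content: Content to compress
--
--     Returns:
--         Compressed content
--     """
--     # Detect and compress repeated patterns
--     lines = content.split('\n')
--     compressed_lines = []
--
--     i = 0
--     while i < len(lines):
--         line = lines[i]
--
--         # Check for repeated lines
--         repeat_count = 1
--         j = i + 1
--         while j < len(lines) and lines[j] == line and line.strip():
--             repeat_count += 1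
--             j += 1
--
--         if repeat_count >= 3:
--             # Compress repeated lines
--             compressed_lines.append(line)
--             compressed_lines.append(f"[... repeated {repeat_count - 1} more times ...]")
--             i = j
--         else:
--             compressed_lines.append(line)
--             i += 1
--
--     return '\n'.join(compressed_lines)
-- ===== SOURCE B (Python) =====
-- def _runs(lines):
--     """Group consecutive equal lines into (line, count) runs, single pass."""
--     runs = []
--     for line in lines:
--         if runs and runs[-1][0] == line:
--             runs[-1] = (line, runs[-1][1] + 1)
--         else:
--             runs.append((line, 1))
--     return runs
--
--
-- def _compress_repetitive_content(content: str) -> str: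
--     out = []
--     for line, n in _runs(content.split('\n')):
--         if n >= 3 and line.strip():
--             out.append(line)
--             out.append(f"[... repeated {n - 1} more times ...]")
--         else:
--             out.extend([line] * n)
--     return '\n'.join(out)
-- ===== Notes on version B (the rewrite author's own statement) =====
-- stated objective: idiomatic
-- what changed: Replaces A's index/j-jump run scanner with a grouping-first decomposition: one pass builds (line, count) runs of consecutive equal lines, then each run is emitted either collapsed (non-blank, count>=3) or repeated verbatim.
import Mathlib
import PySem

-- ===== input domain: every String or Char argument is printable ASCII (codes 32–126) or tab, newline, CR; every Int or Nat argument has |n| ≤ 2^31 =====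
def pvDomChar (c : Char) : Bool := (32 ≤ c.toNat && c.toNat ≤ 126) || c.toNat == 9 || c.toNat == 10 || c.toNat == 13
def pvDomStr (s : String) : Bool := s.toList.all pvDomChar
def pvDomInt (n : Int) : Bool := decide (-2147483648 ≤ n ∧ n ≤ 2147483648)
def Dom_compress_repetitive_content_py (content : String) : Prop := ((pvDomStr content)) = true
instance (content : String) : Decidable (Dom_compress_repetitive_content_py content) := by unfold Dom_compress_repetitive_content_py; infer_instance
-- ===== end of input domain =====

-- B collapses runs of repeated lines by a grouping-first decomposition (build (line, count)
-- runs, then emit each run) instead of A's index/j-jump scanner; same cost, more idiomatic.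

-- ===== PORT A =====
-- A's inner `while j < len(lines) and lines[j] == line and line.strip():` — number of
-- further equal copies consumed
def pvRunLenA (line : String) : List String → Nat
  | [] => 0
  | x :: xs => if x == line && !(PySem.Str.strip line == "") then pvRunLenA line xs + 1 else 0

-- A's outer while over the remaining suffix of `lines`
def pvLoopA : List String → List String
  | [] => []
  | line :: rest =>
    let repeat_count := 1 + pvRunLenA line rest
    if repeat_count ≥ 3 then
      line ::
        ("[... repeated " ++ PySem.Int.toStr (Int.ofNat (repeat_count - 1)) ++ " more times ...]") ::
        pvLoopA (rest.drop (repeat_count - 1))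
    else
      line :: pvLoopA rest
termination_by l => l.length
decreasing_by
  · simp only [List.length_drop, List.length_cons]; omega
  · simp only [List.length_cons]; omega

-- `content.split('\n')`: sep ≠ "", so split? always returns some
def compress_repetitive_content_py (content : String) : String :=
  PySem.Str.join "\n" (pvLoopA ((PySem.Str.split? content "\n").getD []))

-- ===== PORT B =====
-- Source B keeps the runs list with the current run at the BACK (`runs[-1]`); the port keeps
-- the accumulator most-recent-first and reverses at the end — the standard faithful
-- encoding of append/update-last in a fold.
def pvStepB (acc : List (String × Nat)) (line : String) : List (String × Nat) :=
  match acc with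
  | (l, k) :: t => if l == line then (l, k + 1) :: t else (line, 1) :: (l, k) :: t
  | [] => [(line, 1)]

def pvRunsB (lines : List String) : List (String × Nat) :=
  (lines.foldl pvStepB []).reverse

def pvEmitB (p : String × Nat) : List String :=
  if p.2 ≥ 3 && !(PySem.Str.strip p.1 == "") then
    [p.1, "[... repeated " ++ PySem.Int.toStr (Int.ofNat (p.2 - 1)) ++ " more times ...]"]
  else
    List.replicate p.2 p.1

def compress_repetitive_content_py_alt (content : String) : String :=
  PySem.Str.join "\n" ((pvRunsB ((PySem.Str.split? content "\n").getD [])).flatMap pvEmitB)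

-- ===== PRECONDITION & SPEC =====
def Spec_compress_repetitive_content_py (content : String) (out : String) : Prop := out = compress_repetitive_content_py_alt content
instance (content : String) (out : String) : Decidable (Spec_compress_repetitive_content_py content out) := by unfold Spec_compress_repetitive_content_py; infer_instance

-- ===== CLAIM (what is proved, stated in full; the proofs are below) =====
def Claim_equal_compress_repetitive_content_py : Prop := ∀ (content : String), Dom_compress_repetitive_content_py content → Spec_compress_repetitive_content_py content (compress_repetitive_content_py content)

-- ===== LEMMAS AND PROOFS =====

-- number of leading elements of the list equal to `l` (unconditional run length minus one)
def pvCountEq (l : String) : List String → Nat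
  | [] => 0
  | x :: xs => if x == l then pvCountEq l xs + 1 else 0

-- canonical forward grouping into runs
def pvRunsRec : List String → List (String × Nat)
  | [] => []
  | x :: xs => (x, pvCountEq x xs + 1) :: pvRunsRec (xs.drop (pvCountEq x xs))
termination_by l => l.length
decreasing_by simp only [List.length_drop, List.length_cons]; omega

theorem pvRunLenA_of_blank (line : String) (h : (PySem.Str.strip line == "") = true) :
    ∀ xs : List String, pvRunLenA line xs = 0 := by
  intro xs
  cases xs with
  | nil => rfl
  | cons x xs => simp [pvRunLenA, h]

theorem pvRunLenA_eq_countEq (line : String) (h : (PySem.Str.strip line == "") = false) :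
    ∀ xs : List String, pvRunLenA line xs = pvCountEq line xs := by
  intro xs
  induction xs with
  | nil => rfl
  | cons x xs ih => simp [pvRunLenA, pvCountEq, h, ih]

theorem pvFoldStep (lines : List String) :
    ∀ (l : String) (k : Nat) (t : List (String × Nat)),
      (lines.foldl pvStepB ((l, k) :: t)).reverse =
        t.reverse ++ (l, k + pvCountEq l lines) :: pvRunsRec (lines.drop (pvCountEq l lines)) := by
  induction lines with
  | nil => intro l k t; simp [pvCountEq, pvRunsRec]
  | cons x xs ih =>
    intro l k t
    by_cases hx : x = l
    · subst hx
      simp only [List.foldl_cons, pvStepB, beq_self_eq_true, if_true, pvCountEq]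
      rw [ih x (k + 1) t]
      simp only [List.drop_succ_cons]
      ring_nf
    · have hlx : (l == x) = false := by
        simp only [beq_eq_false_iff_ne]; exact fun e => hx e.symm
      have hxl : (x == l) = false := by
        simp only [beq_eq_false_iff_ne]; exact hx
      simp only [List.foldl_cons, pvStepB, hlx, Bool.false_eq_true, if_false]
      rw [ih x 1 ((l, k) :: t)]
      simp only [pvCountEq, hxl, Bool.false_eq_true, if_false, List.drop_zero]
      rw [pvRunsRec]
      simp [Nat.add_comm]

theorem pvRunsB_eq_runsRec (lines : List String) : pvRunsB lines = pvRunsRec lines := by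
  cases lines with
  | nil => simp [pvRunsB, pvRunsRec]
  | cons x xs =>
    unfold pvRunsB
    simp only [List.foldl_cons, pvStepB]
    rw [pvFoldStep xs x 1 []]
    rw [pvRunsRec]
    simp [Nat.add_comm]

theorem pvCountEq_cons_self (l : String) (xs : List String) :
    pvCountEq l (l :: xs) = pvCountEq l xs + 1 := by
  simp [pvCountEq]

theorem pvLoopA_eq_flatMap : ∀ (N : Nat) (lines : List String), lines.length ≤ N →
    pvLoopA lines = (pvRunsRec lines).flatMap pvEmitB := by
  intro N
  induction N with
  | zero =>
    intro lines h
    have : lines = [] := List.eq_nil_of_length_eq_zero (Nat.le_zero.mp h)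
    subst this
    simp [pvLoopA, pvRunsRec]
  | succ N ih =>
    intro lines h
    cases lines with
    | nil => simp [pvLoopA, pvRunsRec]
    | cons line rest =>
      simp only [List.length_cons, Nat.succ_le_succ_iff] at h
      rw [pvRunsRec]
      by_cases hb : (PySem.Str.strip line == "") = true
      · -- blank line: A never collapses; each copy is emitted one at a time
        rw [pvLoopA]
        have h0 : pvRunLenA line rest = 0 := pvRunLenA_of_blank line hb rest
        simp only [h0]
        have hlt : ¬ (1 + 0 ≥ 3) := by omega
        rw [if_neg hlt]
        have hemit : pvEmitB (line, pvCountEq line rest + 1) =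
            List.replicate (pvCountEq line rest + 1) line := by
          simp [pvEmitB, hb]
        cases hn : pvCountEq line rest with
        | zero =>
          rw [hn] at hemit
          rw [ih rest h]
          simp [List.flatMap_cons, hemit]
        | succ m =>
          -- rest starts with `line` (countEq > 0)
          cases rest with
          | nil => simp [pvCountEq] at hn
          | cons y ys =>
            have hy : y = line := by
              by_contra hc
              have : (y == line) = false := by
                simp only [beq_eq_false_iff_ne]; exact hc
              simp [pvCountEq, this] at hn
            subst hy
            have hm : pvCountEq y ys = m := by
              rw [pvCountEq_cons_self] at hn; omega
            rw [ih (y :: ys) h]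
            rw [pvRunsRec]
            have hemit2 : pvEmitB (y, pvCountEq y ys + 1) =
                List.replicate (pvCountEq y ys + 1) y := by
              simp [pvEmitB, hb]
            rw [hn] at hemit
            rw [hm] at hemit2
            simp only [List.flatMap_cons, hemit, hemit2, hm, List.drop_succ_cons]
            simp [List.replicate_succ]
      · have hbf : (PySem.Str.strip line == "") = false := Bool.eq_false_iff.mpr hb
        have hc : pvRunLenA line rest = pvCountEq line rest := pvRunLenA_eq_countEq line hbf rest
        rw [pvLoopA]
        simp only [hc]
        by_cases h3 : 1 + pvCountEq line rest ≥ 3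
        · rw [if_pos h3]
          have hemit : pvEmitB (line, pvCountEq line rest + 1) =
              [line, "[... repeated " ++ PySem.Int.toStr (Int.ofNat (pvCountEq line rest + 1 - 1)) ++ " more times ...]"] := by
            simp only [pvEmitB]
            rw [if_pos (by simp [hbf]; omega)]
          have hlen : (rest.drop (1 + pvCountEq line rest - 1)).length ≤ N :=
            le_trans (by simp [List.length_drop]) h
          rw [ih _ hlen]
          have harg : 1 + pvCountEq line rest - 1 = pvCountEq line rest := by omega
          simp [List.flatMap_cons, hemit, harg]
        · rw [if_neg h3]
          have hemit : pvEmitB (line, pvCountEq line rest + 1) =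
              List.replicate (pvCountEq line rest + 1) line := by
            simp only [pvEmitB]
            rw [if_neg (by simp; intro h'; omega)]
          cases hn : pvCountEq line rest with
          | zero =>
            rw [hn] at hemit
            rw [ih rest h]
            simp [List.flatMap_cons, hemit]
          | succ m =>
            have hm0 : m = 0 := by omega
            subst hm0
            cases rest with
            | nil => simp [pvCountEq] at hn
            | cons y ys =>
              have hy : y = line := by
                by_contra hcc
                have : (y == line) = false := by
                  simp only [beq_eq_false_iff_ne]; exact hcc
                simp [pvCountEq, this] at hn
              subst hy
              have hm : pvCountEq y ys = 0 := by
                rw [pvCountEq_cons_self] at hn; omega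
              -- A emits the first copy, then its loop sees the single remaining copy
              rw [ih (y :: ys) h]
              rw [pvRunsRec]
              have hemit2 : pvEmitB (y, pvCountEq y ys + 1) =
                  List.replicate (pvCountEq y ys + 1) y := by
                simp only [pvEmitB]
                rw [if_neg (by simp [hm])]
              rw [hn] at hemit
              rw [hm] at hemit2
              simp only [List.flatMap_cons, hemit, hemit2, hm, List.drop_succ_cons]
              simp [List.replicate_succ]

-- ===== VERDICT (by name: the statement is the Claim_ definition above) =====
theorem compress_repetitive_content_py_spec : Claim_equal_compress_repetitive_content_py := by
  intro content _
  unfold Spec_compress_repetitive_content_py compress_repetitive_content_py compress_repetitive_content_py_alt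
  rw [pvRunsB_eq_runsRec,
    pvLoopA_eq_flatMap ((PySem.Str.split? content "\n").getD []).length _ le_rfl]
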